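-- pv_equiv track=rewrite | github.com/siat-nlp/HSEMEC-code-data | HSEMEC/ecm/baseline.py | refine_data
-- ===== SOURCE A (Python) =====
-- def refine_data(data):
--     new_data = []
--     for d in data:
--         b = []
--         for e in range(6):
--             b.append([x for x in d if x[-1] == e])
--         new_data.append(b)
--     return new_data
-- ===== SOURCE B (Python) =====
-- def refine_data(data):
--     new_data = []
--     for d in data:
--         buckets = [[] for _ in range(6)]
--         for x in d:
--             if 0 <= x[-1] < 6:
--                 buckets[x[-1]].append(x)
--         new_data.append(buckets)
--     return new_data
-- ===== Notes on version B (the rewrite author's own statement) =====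
-- stated objective: alternative
-- what changed: Instead of scanning each record 6 times (one filter pass per bucket value), B makes a single pass over each record, appending every item to one of six pre-allocated buckets indexed by its last field when it lies in 0..5.
import Mathlib
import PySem

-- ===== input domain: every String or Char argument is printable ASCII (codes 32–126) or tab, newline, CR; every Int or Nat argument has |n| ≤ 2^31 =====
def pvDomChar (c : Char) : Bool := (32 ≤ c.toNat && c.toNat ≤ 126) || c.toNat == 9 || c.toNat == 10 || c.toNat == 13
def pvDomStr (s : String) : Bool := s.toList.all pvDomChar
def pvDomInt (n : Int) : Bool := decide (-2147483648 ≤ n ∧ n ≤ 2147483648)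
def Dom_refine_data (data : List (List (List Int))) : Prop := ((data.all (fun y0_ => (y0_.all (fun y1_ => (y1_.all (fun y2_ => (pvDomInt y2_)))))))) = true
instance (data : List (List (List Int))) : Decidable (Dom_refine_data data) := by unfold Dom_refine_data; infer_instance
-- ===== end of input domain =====

-- B replaces A's six filter passes per record by one bucketing pass into six pre-allocated buckets.

-- ===== PORT A =====
-- x[-1] == e : on an empty x Python raises IndexError (excluded by Pre_); pyGet? returns none there.
def refine_data (data : List (List (List Int))) : List (List (List (List Int))) :=
  data.foldl (fun new_data d =>
    new_data ++ [(PySem.List.pyRange 0 6 1).foldl (fun b e =>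
      b ++ [d.filter (fun x => PySem.List.pyGet? x (-1) == some e)]) []]) []

-- ===== PORT B =====
-- one step of B's inner loop: append x to buckets[x[-1]] when 0 <= x[-1] < 6
def altStep (bs : List (List (List Int))) (x : List Int) : List (List (List Int)) :=
  match PySem.List.pyGet? x (-1) with
  | some k => if 0 ≤ k ∧ k < 6 then bs.set k.toNat (bs.getD k.toNat [] ++ [x]) else bs
  | none => bs   -- unreachable under Pre_ (Python raises IndexError here)

def refine_data_alt (data : List (List (List Int))) : List (List (List (List Int))) :=
  data.foldl (fun new_data d =>
    new_data ++ [d.foldl altStep (List.replicate 6 [])]) []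

-- ===== PRECONDITION & SPEC =====
-- Pre_ excludes exactly the inputs where A (and B) raise IndexError: a record containing an empty item.
def Pre_refine_data (data : List (List (List Int))) : Prop :=
  ∀ d ∈ data, ∀ x ∈ d, x ≠ []
instance (data : List (List (List Int))) : Decidable (Pre_refine_data data) := by
  unfold Pre_refine_data; infer_instance

def pvWitness_refine_data : List (List (List Int)) :=
  [[[1], [2, 3], [0, 7], [5]], [], [[-1], [6, 6]]]

def Spec_refine_data (data : List (List (List Int))) (out : List (List (List (List Int)))) : Prop := out = refine_data_alt data
instance (data : List (List (List Int))) (out : List (List (List (List Int)))) : Decidable (Spec_refine_data data out) := by unfold Spec_refine_data; infer_instance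

-- ===== CLAIM (what is proved, stated in full; the proofs are below) =====
def Claim_equal_refine_data : Prop := ∀ (data : List (List (List Int))), Dom_refine_data data → Pre_refine_data data → Spec_refine_data data (refine_data data)

-- ===== LEMMAS AND PROOFS =====

lemma altStep_length (bs : List (List (List Int))) (x : List Int) :
    (altStep bs x).length = bs.length := by
  unfold altStep
  rcases PySem.List.pyGet? x (-1) with _ | k
  · rfl
  · show (if 0 ≤ k ∧ k < 6 then bs.set k.toNat (bs.getD k.toNat [] ++ [x]) else bs).length = bs.length
    split <;> simp

lemma foldl_altStep_length (d : List (List Int)) (bs : List (List (List Int))) :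
    (d.foldl altStep bs).length = bs.length := by
  induction d generalizing bs with
  | nil => rfl
  | cons x d ih => simp [List.foldl, ih, altStep_length]

lemma foldl_altStep_getD (d : List (List Int)) (hne : ∀ x ∈ d, x ≠ [])
    (bs : List (List (List Int))) (hlen : bs.length = 6) (e : ℕ) (he : e < 6) :
    (d.foldl altStep bs).getD e [] =
      bs.getD e [] ++ d.filter (fun x => PySem.List.pyGet? x (-1) == some (e : Int)) := by
  induction d generalizing bs with
  | nil => simp
  | cons x d ih =>
    have hx : x ≠ [] := hne x (by simp)
    have hsome : ∃ k, PySem.List.pyGet? x (-1) = some k := by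
      rw [PySem.List.pyGet?_neg_one]
      rcases h : x.getLast? with _ | k
      · exact absurd (List.getLast?_eq_none_iff.mp h) hx
      · exact ⟨k, rfl⟩
    obtain ⟨k, hk⟩ := hsome
    have hmain : (x :: d).foldl altStep bs = d.foldl altStep (altStep bs x) := rfl
    rw [hmain]
    by_cases hr : 0 ≤ k ∧ k < 6
    · have hstep : altStep bs x = bs.set k.toNat (bs.getD k.toNat [] ++ [x]) := by
        unfold altStep; rw [hk]; simp [hr]
      rw [hstep, ih (fun y hy => hne y (by simp [hy])) _ (by simp [hlen])]
      by_cases hke : k = (e : Int)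
      · have hkn : k.toNat = e := by omega
        have hget : (bs.set k.toNat (bs.getD k.toNat [] ++ [x])).getD e [] =
            bs.getD e [] ++ [x] := by
          subst hkn
          have hlt : k.toNat < bs.length := by omega
          simp [List.getD, hlt]
        rw [hget, List.filter_cons]
        simp [hk, hke]
      · have hkn : k.toNat ≠ e := by omega
        have hget : (bs.set k.toNat (bs.getD k.toNat [] ++ [x])).getD e [] =
            bs.getD e [] := by
          simp [List.getD, hkn]
        rw [hget, List.filter_cons]
        simp [hk, hke]
    · have hstep : altStep bs x = bs := by
        unfold altStep; rw [hk]; simp [hr]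
      rw [hstep, ih (fun y hy => hne y (by simp [hy])) _ hlen, List.filter_cons]
      have hke : k ≠ (e : Int) := by omega
      simp [hk, hke]

lemma record_eq (d : List (List Int)) (hne : ∀ x ∈ d, x ≠ []) :
    (PySem.List.pyRange 0 6 1).foldl (fun b e =>
      b ++ [d.filter (fun x => PySem.List.pyGet? x (-1) == some e)]) [] =
    d.foldl altStep (List.replicate 6 []) := by
  have hrange : PySem.List.pyRange 0 6 1 = [0, 1, 2, 3, 4, 5] := by decide
  have hlen : (d.foldl altStep (List.replicate 6 ([] : List (List Int)))).length = 6 := by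
    rw [foldl_altStep_length]; rfl
  have hgetD : ∀ e : ℕ, e < 6 →
      (d.foldl altStep (List.replicate 6 [])).getD e [] =
        d.filter (fun x => PySem.List.pyGet? x (-1) == some (e : Int)) := by
    intro e he
    rw [foldl_altStep_getD d hne _ (by rfl) e he]
    have hz : (List.replicate 6 ([] : List (List Int))).getD e [] = [] := by
      interval_cases e <;> rfl
    rw [hz, List.nil_append]
  have hL : (([0, 1, 2, 3, 4, 5] : List Int)).foldl (fun b e =>
      b ++ [d.filter (fun x => PySem.List.pyGet? x (-1) == some e)]) [] =
      [d.filter (fun x => PySem.List.pyGet? x (-1) == some 0),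
       d.filter (fun x => PySem.List.pyGet? x (-1) == some 1),
       d.filter (fun x => PySem.List.pyGet? x (-1) == some 2),
       d.filter (fun x => PySem.List.pyGet? x (-1) == some 3),
       d.filter (fun x => PySem.List.pyGet? x (-1) == some 4),
       d.filter (fun x => PySem.List.pyGet? x (-1) == some 5)] := rfl
  rw [hrange, hL]
  apply List.ext_getElem
  · rw [hlen]; rfl
  · intro i h1 h2
    have hi : i < 6 := by simpa using h1
    have h3 : (d.foldl altStep (List.replicate 6 []))[i] =
        d.filter (fun x => PySem.List.pyGet? x (-1) == some (i : Int)) := by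
      rw [← List.getD_eq_getElem _ [] h2]
      exact hgetD i hi
    rw [h3]
    interval_cases i <;> norm_num

lemma top_eq (data : List (List (List Int))) (hne : ∀ d ∈ data, ∀ x ∈ d, x ≠ [])
    (acc : List (List (List (List Int)))) :
    data.foldl (fun new_data d =>
      new_data ++ [(PySem.List.pyRange 0 6 1).foldl (fun b e =>
        b ++ [d.filter (fun x => PySem.List.pyGet? x (-1) == some e)]) []]) acc =
    data.foldl (fun new_data d => new_data ++ [d.foldl altStep (List.replicate 6 [])]) acc := by
  induction data generalizing acc with
  | nil => rfl
  | cons d data ih =>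
    simp only [List.foldl]
    rw [record_eq d (hne d (by simp)), ih (fun d' hd' => hne d' (by simp [hd']))]

-- ===== VERDICT (by name: the statement is the Claim_ definition above) =====
theorem refine_data_spec : Claim_equal_refine_data := by
  intro data _ hpre
  unfold Spec_refine_data refine_data refine_data_alt
  exact top_eq data hpre []
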